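-- pv_equiv track=rewrite | github.com/Djanghao/widget2code-baselines | scripts/batch_infer.py | trim_to_stop
-- ===== SOURCE A (Python) =====
-- from typing import List, Optional, Tuple
--
-- def trim_to_stop(code: str, stop_sequences: Optional[List[str]]) -> str:
--     if not code or not stop_sequences:
--         return code
--     earliest = None
--     stop_used = None
--     for seq in stop_sequences:
--         if not seq:
--             continue
--         idx = code.find(seq)
--         if idx != -1 and (earliest is None or idx < earliest):
--             earliest = idx
--             stop_used = seq
--     if earliest is None or stop_used is None:
--         return code
--     return code[: earliest + len(stop_used)]
-- ===== SOURCE B (Python) =====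
-- from typing import List, Optional
--
--
-- def trim_to_stop(code: str, stop_sequences: Optional[List[str]]) -> str:
--     # Position-major scan: walk positions left to right and cut at the first
--     # position where some (first-listed) non-empty stop sequence starts.
--     for i in range(len(code)):
--         for s in (stop_sequences or []):
--             if s and code.startswith(s, i):
--                 return code[: i + len(s)]
--     return code
-- ===== Notes on version B (the rewrite author's own statement) =====
-- stated objective: alternative
-- what changed: Replaces A's sequence-major pass (one full str.find over code per stop sequence plus earliest/stop_used bookkeeping) with a position-major scan that returns at the first position where any non-empty stop sequence starts (first-listed winning ties), so it stops at the earliest match instead of scanning all of code for every sequence.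
import Mathlib
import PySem

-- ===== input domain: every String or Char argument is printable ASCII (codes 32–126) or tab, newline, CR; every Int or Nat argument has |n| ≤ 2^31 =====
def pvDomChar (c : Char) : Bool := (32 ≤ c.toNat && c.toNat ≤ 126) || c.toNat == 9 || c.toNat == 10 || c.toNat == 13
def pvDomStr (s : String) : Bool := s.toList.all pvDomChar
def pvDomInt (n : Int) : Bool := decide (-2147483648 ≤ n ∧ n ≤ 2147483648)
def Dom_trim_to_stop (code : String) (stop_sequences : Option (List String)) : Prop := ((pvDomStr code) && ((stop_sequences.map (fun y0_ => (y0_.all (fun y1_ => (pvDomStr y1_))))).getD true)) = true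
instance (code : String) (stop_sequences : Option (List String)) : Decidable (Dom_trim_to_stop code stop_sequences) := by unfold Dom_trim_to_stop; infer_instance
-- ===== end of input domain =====

-- B replaces A's sequence-major str.find pass with a position-major scan (first
-- position where a non-empty stop sequence starts, first-listed winning ties),
-- stopping at the earliest match instead of running a full find per sequence.


-- ===== PORT A =====
-- A's loop body: skip empty seq; idx = code.find(seq); update (earliest, stop_used)
-- when idx != -1 and (earliest is None or idx < earliest).
def stepA (code : List Char) (acc : Option Int × Option (List Char)) (seq : List Char) :
    Option Int × Option (List Char) :=
  if seq = [] then acc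
  else if PySem.Chars.find code seq ≠ -1 ∧
      (match acc.1 with
       | none => true
       | some e => decide (PySem.Chars.find code seq < e)) = true then
    (some (PySem.Chars.find code seq), some seq)
  else acc

def trimACore (code : List Char) (seqs : List (List Char)) : List Char :=
  if code = [] ∨ seqs = [] then code          -- `if not code or not stop_sequences`
  else
    match seqs.foldl (stepA code) (none, none) with
    | (some e, some s) => PySem.Chars.slice code none (some (e + (s.length : Int)))  -- code[: earliest + len(stop_used)]
    | _ => code                               -- earliest is None or stop_used is None

def trim_to_stop (code : String) (stop_sequences : Option (List String)) : String :=
  match stop_sequences with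
  | none => code                              -- `not stop_sequences` (None)
  | some seqs => String.ofList (trimACore code.toList (seqs.map String.toList))

-- ===== PORT B =====
-- first s in the list with s non-empty and code.startswith(s, i); startswith(s, i)
-- is exact as "s is a prefix of code[i:]" for 0 ≤ i ≤ len(code).
def firstMatch (code : List Char) (i : Nat) : List (List Char) → Option (List Char)
  | [] => none
  | s :: rest =>
    if s ≠ [] ∧ PySem.Chars.startswith (code.drop i) s = true then some s
    else firstMatch code i rest

-- `for i in range(len(code))`: fuel counts the remaining positions.
def scanB (code : List Char) (seqs : List (List Char)) : Nat → Nat → List Char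
  | _, 0 => code
  | i, fuel + 1 =>
    match firstMatch code i seqs with
    | some s => code.take (i + s.length)      -- code[: i + len(s)]
    | none => scanB code seqs (i + 1) fuel

def trim_to_stop_alt (code : String) (stop_sequences : Option (List String)) : String :=
  String.ofList (scanB code.toList ((stop_sequences.getD []).map String.toList) 0 code.toList.length)

-- ===== PRECONDITION & SPEC =====
def Spec_trim_to_stop (code : String) (stop_sequences : Option (List String)) (out : String) : Prop := out = trim_to_stop_alt code stop_sequences
instance (code : String) (stop_sequences : Option (List String)) (out : String) : Decidable (Spec_trim_to_stop code stop_sequences out) := by unfold Spec_trim_to_stop; infer_instance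

-- ===== CLAIM (what is proved, stated in full; the proofs are below) =====
def Claim_equal_trim_to_stop : Prop := ∀ (code : String) (stop_sequences : Option (List String)), Dom_trim_to_stop code stop_sequences → Spec_trim_to_stop code stop_sequences (trim_to_stop code stop_sequences)

-- ===== LEMMAS AND PROOFS =====

-- Characterisation of A's fold state.
def GoodSt (code : List Char) (seqs : List (List Char)) :
    Option Int × Option (List Char) → Prop
  | (none, none) => ∀ t ∈ seqs, t = [] ∨ PySem.Chars.find code t = -1
  | (some e, some s) =>
      0 ≤ e ∧ s ≠ [] ∧ PySem.Chars.find code s = e ∧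
      (∃ pre post, seqs = pre ++ s :: post ∧
        ∀ t ∈ pre, t = [] ∨ PySem.Chars.find code t = -1 ∨ e < PySem.Chars.find code t) ∧
      (∀ t ∈ seqs, t ≠ [] → PySem.Chars.find code t = -1 ∨ e ≤ PySem.Chars.find code t)
  | _ => False

theorem good_foldl (code : List Char) (seqs : List (List Char)) :
    GoodSt code seqs (seqs.foldl (stepA code) (none, none)) := by
  induction seqs using List.reverseRecOn with
  | nil => intro t ht; simp at ht
  | append_singleton seqs u ih =>
    rw [List.foldl_append, List.foldl_cons, List.foldl_nil]
    rcases hfold : seqs.foldl (stepA code) (none, none) with ⟨e?, s?⟩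
    rw [hfold] at ih
    cases e? with
    | none =>
      cases s? with
      | some s => exact ih.elim
      | none =>
        simp only [GoodSt] at ih
        simp only [stepA]
        by_cases hu : u = []
        · rw [if_pos hu]
          intro t ht
          rcases List.mem_append.1 ht with h | h
          · exact ih t h
          · simp at h; subst h; exact Or.inl hu
        · rw [if_neg hu]
          by_cases hi : PySem.Chars.find code u = -1
          · rw [if_neg (by simp [hi])]
            intro t ht
            rcases List.mem_append.1 ht with h | h
            · exact ih t h
            · simp at h; subst h; exact Or.inr hi
          · rw [if_pos ⟨hi, trivial⟩]
            have h0 : 0 ≤ PySem.Chars.find code u := by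
              have := PySem.Chars.neg_one_le_find code u; omega
            refine ⟨h0, hu, rfl, ⟨seqs, [], by simp, ?_⟩, ?_⟩
            · intro t ht
              rcases ih t ht with h | h
              · exact Or.inl h
              · exact Or.inr (Or.inl h)
            · intro t ht htne
              rcases List.mem_append.1 ht with h | h
              · rcases ih t h with h' | h'
                · exact absurd h' htne
                · exact Or.inl h'
              · simp at h; subst h; exact Or.inr le_rfl
    | some e =>
      cases s? with
      | none => exact ih.elim
      | some s =>
        simp only [GoodSt] at ih
        obtain ⟨he, hs, hfs, ⟨pre, post, hdec, hpre⟩, hmin⟩ := ih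
        simp only [stepA]
        by_cases hu : u = []
        · rw [if_pos hu]
          simp only [GoodSt]
          refine ⟨he, hs, hfs, ⟨pre, post ++ [u], by simp [hdec], hpre⟩, ?_⟩
          intro t ht htne
          rcases List.mem_append.1 ht with h | h
          · exact hmin t h htne
          · simp at h; subst h; exact absurd hu htne
        · rw [if_neg hu]
          by_cases hcond : PySem.Chars.find code u ≠ -1 ∧ PySem.Chars.find code u < e
          · rw [if_pos ⟨hcond.1, by simp [hcond.2]⟩]
            have h0 : 0 ≤ PySem.Chars.find code u := by
              have := PySem.Chars.neg_one_le_find code u; omega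
            refine ⟨h0, hu, rfl, ⟨seqs, [], by simp, ?_⟩, ?_⟩
            · intro t ht
              by_cases ht0 : t = []
              · exact Or.inl ht0
              rcases hmin t ht ht0 with h | h
              · exact Or.inr (Or.inl h)
              · exact Or.inr (Or.inr (by omega))
            · intro t ht htne
              rcases List.mem_append.1 ht with h | h
              · rcases hmin t h htne with h' | h'
                · exact Or.inl h'
                · exact Or.inr (by omega)
              · simp at h; subst h; exact Or.inr le_rfl
          · rw [if_neg (by rintro ⟨h1', h2'⟩; rw [decide_eq_true_eq] at h2'; exact hcond ⟨h1', h2'⟩)]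
            refine ⟨he, hs, hfs, ⟨pre, post ++ [u], by simp [hdec], hpre⟩, ?_⟩
            intro t ht htne
            rcases List.mem_append.1 ht with h | h
            · exact hmin t h htne
            · simp at h; subst h
              by_cases hne : PySem.Chars.find code t = -1
              · exact Or.inl hne
              · refine Or.inr ?_
                have h2 : ¬ PySem.Chars.find code t < e := fun hlt => hcond ⟨hne, hlt⟩
                omega

-- find code t ≤ j whenever t starts at position j.
theorem find_le_of_prefix_drop (code t : List Char) (j : Nat)
    (h : t <+: code.drop j) : PySem.Chars.find code t ≠ -1 ∧ PySem.Chars.find code t ≤ (j : Int) := by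
  have hinf : t <:+: code := h.isInfix.trans (List.drop_suffix j code).isInfix
  have hne : PySem.Chars.find code t ≠ -1 := (PySem.Chars.find_ne_neg_one_iff code t).2 hinf
  have h0 : 0 ≤ PySem.Chars.find code t := by
    have := PySem.Chars.neg_one_le_find code t; omega
  refine ⟨hne, ?_⟩
  have hmin := (PySem.Chars.find_spec h0).2
  by_contra hlt
  exact hmin j (by omega) h

theorem firstMatch_none_iff (code : List Char) (j : Nat) (seqs : List (List Char)) :
    firstMatch code j seqs = none ↔ ∀ t ∈ seqs, t = [] ∨ ¬ t <+: code.drop j := by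
  induction seqs with
  | nil => simp [firstMatch]
  | cons s rest ih =>
    unfold firstMatch
    by_cases h : s ≠ [] ∧ PySem.Chars.startswith (code.drop j) s = true
    · rw [if_pos h]
      simp only [PySem.Chars.startswith_iff] at h
      constructor
      · intro h'; cases h'
      · intro h'
        rcases h' s (by simp) with h'' | h''
        · exact absurd h'' h.1
        · exact absurd h.2 h''
    · rw [if_neg h, ih]
      constructor
      · intro h' t ht
        rcases List.mem_cons.1 ht with rfl | ht'
        · by_cases hte : t = []
          · exact Or.inl hte
          · exact Or.inr fun hp => h ⟨hte, (PySem.Chars.startswith_iff _ _).2 hp⟩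
        · exact h' t ht'
      · intro h' t ht; exact h' t (List.mem_cons_of_mem _ ht)

theorem firstMatch_some (code : List Char) (j : Nat) (pre post : List (List Char)) (s : List Char)
    (hpre : ∀ t ∈ pre, t = [] ∨ ¬ t <+: code.drop j)
    (hs : s ≠ []) (hp : s <+: code.drop j) :
    firstMatch code j (pre ++ s :: post) = some s := by
  induction pre with
  | nil =>
    simp only [List.nil_append]
    unfold firstMatch
    rw [if_pos ⟨hs, (PySem.Chars.startswith_iff _ _).2 hp⟩]
  | cons t rest ih =>
    simp only [List.cons_append]
    unfold firstMatch
    rw [if_neg ?_]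
    · exact ih fun t' ht' => hpre t' (List.mem_cons_of_mem _ ht')
    · rintro ⟨htne, hts⟩
      rcases hpre t (by simp) with h | h
      · exact htne h
      · exact h ((PySem.Chars.startswith_iff _ _).1 hts)

theorem scanB_none (code : List Char) (seqs : List (List Char))
    (hall : ∀ j, firstMatch code j seqs = none) :
    ∀ fuel i, scanB code seqs i fuel = code := by
  intro fuel
  induction fuel with
  | zero => intro i; rfl
  | succ fuel ih => intro i; unfold scanB; rw [hall i]; exact ih (i + 1)

theorem scanB_some (code : List Char) (seqs : List (List Char)) (j : Nat) (s : List Char)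
    (hj : firstMatch code j seqs = some s)
    (hbefore : ∀ j', j' < j → firstMatch code j' seqs = none) :
    ∀ fuel i, i ≤ j → j < i + fuel → scanB code seqs i fuel = code.take (j + s.length) := by
  intro fuel
  induction fuel with
  | zero => intro i h1 h2; omega
  | succ fuel ih =>
    intro i h1 h2
    unfold scanB
    rcases Nat.eq_or_lt_of_le h1 with rfl | hlt
    · rw [hj]
    · rw [hbefore i hlt]
      exact ih (i + 1) hlt (by omega)

theorem core_eq (code : List Char) (seqs : List (List Char)) :
    trimACore code seqs = scanB code seqs 0 code.length := by
  by_cases hg : code = [] ∨ seqs = []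
  · rcases hg with h | h
    · subst h
      unfold trimACore
      simp [scanB]
    · subst h
      unfold trimACore
      rw [if_pos (Or.inr rfl)]
      exact (scanB_none code [] (fun j => rfl) _ 0).symm
  · rw [not_or] at hg
    unfold trimACore
    rw [if_neg (by simp [hg.1, hg.2])]
    have G := good_foldl code seqs
    rcases hfold : seqs.foldl (stepA code) (none, none) with ⟨e?, s?⟩
    rw [hfold] at G
    cases e? with
    | none =>
      cases s? with
      | some s => exact G.elim
      | none =>
        simp only [GoodSt] at G
        refine (scanB_none code seqs ?_ _ 0).symm
        intro j
        rw [firstMatch_none_iff]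
        intro t ht
        rcases G t ht with h | h
        · exact Or.inl h
        · exact Or.inr fun hp => (find_le_of_prefix_drop code t j hp).1 h
    | some e =>
      cases s? with
      | none => exact G.elim
      | some s =>
        simp only [GoodSt] at G
        obtain ⟨he, hs, hfs, ⟨pre, post, hdec, hpre⟩, hmin⟩ := G
        set j := e.toNat with hjdef
        have hje : (j : Int) = e := by omega
        have hsp : s <+: code.drop j := by
          have := (PySem.Chars.find_spec (s := code) (sub := s) (by omega)).1
          rwa [hfs] at this
        have hjlt : j < code.length := by
          by_contra hge
          have hdrop : code.drop j = [] := List.drop_eq_nil_of_le (by omega)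
          rw [hdrop] at hsp
          exact hs (List.prefix_nil.1 hsp)
        have hFMj : firstMatch code j seqs = some s := by
          rw [hdec]
          refine firstMatch_some code j pre post s ?_ hs hsp
          intro t ht
          by_cases hte : t = []
          · exact Or.inl hte
          refine Or.inr fun hp => ?_
          have hle := find_le_of_prefix_drop code t j hp
          rcases hpre t ht with h | h | h
          · exact hte h
          · exact hle.1 h
          · omega
        have hFMb : ∀ j', j' < j → firstMatch code j' seqs = none := by
          intro j' hj'
          rw [firstMatch_none_iff]
          intro t ht
          by_cases hte : t = []
          · exact Or.inl hte
          refine Or.inr fun hp => ?_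
          have hle := find_le_of_prefix_drop code t j' hp
          rcases hmin t ht hte with h | h
          · exact hle.1 h
          · omega
        rw [scanB_some code seqs j s hFMj hFMb code.length 0 (by omega) (by omega)]
        show PySem.Chars.slice code none (some (e + (s.length : Int))) = List.take (j + s.length) code
        rw [PySem.Chars.slice_eq_listSlice, PySem.List.slice_to code (by omega)]
        congr 1
        omega

-- ===== VERDICT (by name: the statement is the Claim_ definition above) =====
theorem trim_to_stop_spec : Claim_equal_trim_to_stop := by
  intro code stop_sequences _
  unfold Spec_trim_to_stop trim_to_stop trim_to_stop_alt
  cases stop_sequences with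
  | none =>
    simp only [Option.getD_none, List.map_nil]
    rw [← core_eq]
    unfold trimACore
    rw [if_pos (Or.inr rfl)]
    simp
  | some seqs =>
    simp only [Option.getD_some]
    rw [core_eq]
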